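-- pv_equiv track=rewrite | github.com/tinystork/ZeSolver | tools/build_blind_index.py | _normalize_families
-- ===== SOURCE A (Python) =====
-- def _normalize_families(values: list[str] | None) -> list[str] | None:
--     if not values:
--         return None
--     normalized: list[str] = []
--     seen: set[str] = set()
--     for raw in values:
--         for chunk in str(raw).replace(";", ",").split(","):
--             name = chunk.strip().lower()
--             if not name or name in seen:
--                 continue
--             seen.add(name)
--             normalized.append(name)
--     return normalized or None
-- ===== SOURCE B (Python) =====
-- def _normalize_families(values: list[str] | None) -> list[str] | None:
--     if not values:
--         return None
--     ts = [name
--           for raw in values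
--           for chunk in str(raw).replace(";", ",").split(",")
--           if (name := chunk.strip().lower())]
--     pairs = sorted(zip(ts, range(len(ts))))
--     keep = []
--     prev = None
--     for name, i in pairs:
--         if name != prev:
--             keep.append(i)
--         prev = name
--     out = [ts[i] for i in sorted(keep)]
--     return out or None
-- ===== Notes on version B (the rewrite author's own statement) =====
-- stated objective: alternative
-- what changed: A's single interleaved pass (nested loops appending under a mutable seen-set) is replaced by a sort-based dedup: flatten the normalized tokens, lexicographically sort (token, index) pairs, keep the first index of each run of equal tokens, re-sort the kept indices and map them back to tokens (no hash set or dict).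
import Mathlib
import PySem

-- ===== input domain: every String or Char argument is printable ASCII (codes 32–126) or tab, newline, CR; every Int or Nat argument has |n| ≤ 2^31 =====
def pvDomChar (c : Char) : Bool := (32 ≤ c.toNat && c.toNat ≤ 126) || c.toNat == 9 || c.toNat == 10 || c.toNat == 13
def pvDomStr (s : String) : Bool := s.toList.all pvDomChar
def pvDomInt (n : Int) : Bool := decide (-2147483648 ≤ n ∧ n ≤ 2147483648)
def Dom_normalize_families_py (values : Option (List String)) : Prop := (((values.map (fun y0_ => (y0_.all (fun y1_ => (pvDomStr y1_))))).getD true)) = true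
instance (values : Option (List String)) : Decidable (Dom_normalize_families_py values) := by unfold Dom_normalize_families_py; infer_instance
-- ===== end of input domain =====

-- B replaces A's single interleaved pass (nested loops appending under a mutable
-- seen-set) by a sort-based dedup: flatten the normalized tokens, sort (token, index)
-- pairs, keep the first index of each equal-token run, re-sort the kept indices;
-- objective: alternative (no hash set/dict, dedup by sorting instead).

-- shared helpers (identical subexpressions in both Pythons):
-- str(raw).replace(";", ",").split(",")
def pvChunks (raw : String) : List String :=
  (PySem.Str.split? (PySem.Str.replace raw ";" ",") ",").getD []
-- chunk.strip().lower()
def pvNorm (chunk : String) : String :=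
  PySem.Str.lower (PySem.Str.strip chunk)

-- ===== PORT A =====
def normalize_families_py (values : Option (List String)) : Option (List String) :=
  match values with
  | none => none
  | some vs =>
    if vs = [] then none
    else
      let st := vs.foldl (fun st raw =>
        (pvChunks raw).foldl (fun st chunk =>
          let name := pvNorm chunk
          if name = "" ∨ PySem.Set.contains st.2 name = true then st
          else (st.1 ++ [name], PySem.Set.add st.2 name)) st)
        (([] : List String), (PySem.Set.empty : PySem.Set String))
      if st.1 = [] then none else some st.1

-- ===== PORT B =====
def normalize_families_py_alt (values : Option (List String)) : Option (List String) :=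
  match values with
  | none => none
  | some vs =>
    if vs = [] then none
    else
      -- ts = [name for raw in vs for chunk in … if (name := …)]
      let ts := vs.flatMap (fun raw => ((pvChunks raw).map pvNorm).filter (fun n => n ≠ ""))
      -- pairs = sorted(zip(ts, range(len(ts))))   (tuple comparison = lexicographic)
      let pairs := PySem.List.sorted2 (ts.zip (PySem.List.pyRange 0 (ts.length : Int))) Prod.fst Prod.snd
      -- keep = first index of each run of equal names (prev starts as None)
      let st := pairs.foldl
        (fun st p => ((if some p.1 ≠ st.2 then st.1 ++ [p.2] else st.1), some p.1))
        (([] : List Int), (none : Option String))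
      -- out = [ts[i] for i in sorted(keep)]  (every i is in range, so getD is exact)
      let out := (PySem.List.sorted st.1 (fun i => i)).map (fun i => PySem.List.pyGetD ts i "")
      if out = [] then none else some out

-- ===== PRECONDITION & SPEC =====
def Spec_normalize_families_py (values : Option (List String)) (out : Option (List String)) : Prop := out = normalize_families_py_alt values
instance (values : Option (List String)) (out : Option (List String)) : Decidable (Spec_normalize_families_py values out) := by unfold Spec_normalize_families_py; infer_instance

-- ===== CLAIM (what is proved, stated in full; the proofs are below) =====
def Claim_equal_normalize_families_py : Prop := ∀ (values : Option (List String)), Dom_normalize_families_py values → Spec_normalize_families_py values (normalize_families_py values)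

-- ===== LEMMAS AND PROOFS =====

-- the deduplicating step of A on a paired (output, seen) state
def pvStep (st : List String × PySem.Set String) (name : String) : List String × PySem.Set String :=
  if PySem.Set.contains st.2 name = true then st
  else (st.1 ++ [name], PySem.Set.add st.2 name)

-- A's inner chunk loop = fold of pvStep over the normalized nonempty tokens of one raw
theorem pv_inner (cs : List String) (st : List String × PySem.Set String) :
    cs.foldl (fun st chunk =>
      let name := pvNorm chunk
      if name = "" ∨ PySem.Set.contains st.2 name = true then st
      else (st.1 ++ [name], PySem.Set.add st.2 name)) st
    = ((cs.map pvNorm).filter (fun n => n ≠ "")).foldl pvStep st := by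
  induction cs generalizing st with
  | nil => simp
  | cons c cs ih =>
    rw [List.foldl_cons, List.map_cons, List.filter_cons]
    have hhead : (let name := pvNorm c
        if name = "" ∨ PySem.Set.contains st.2 name = true then st
        else (st.1 ++ [name], PySem.Set.add st.2 name))
      = if pvNorm c = "" then st else pvStep st (pvNorm c) := by
      show (if pvNorm c = "" ∨ PySem.Set.contains st.2 (pvNorm c) = true then st
        else (st.1 ++ [pvNorm c], PySem.Set.add st.2 (pvNorm c)))
        = if pvNorm c = "" then st else pvStep st (pvNorm c)
      by_cases h : pvNorm c = ""
      · rw [if_pos h, if_pos (Or.inl h)]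
      · rw [if_neg h]
        simp only [pvStep]
        by_cases h2 : PySem.Set.contains st.2 (pvNorm c) = true
        · rw [if_pos (Or.inr h2), if_pos h2]
        · rw [if_neg (fun hc => hc.elim h h2), if_neg h2]
    rw [hhead]
    by_cases h : pvNorm c = ""
    · rw [if_pos h, if_neg (by simp [h])]
      exact ih st
    · rw [if_neg h, if_pos (by simp [h]), List.foldl_cons]
      exact ih _

-- the nested loop over the raws = one fold of pvStep over the flat token list
theorem pv_outer (vs : List String) (st : List String × PySem.Set String) :
    vs.foldl (fun st raw =>
      (pvChunks raw).foldl (fun st chunk =>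
        let name := pvNorm chunk
        if name = "" ∨ PySem.Set.contains st.2 name = true then st
        else (st.1 ++ [name], PySem.Set.add st.2 name)) st) st
    = (vs.flatMap (fun raw => ((pvChunks raw).map pvNorm).filter (fun n => n ≠ ""))).foldl pvStep st := by
  induction vs generalizing st with
  | nil => rfl
  | cons v vs ih =>
    simp only [List.foldl_cons, List.flatMap_cons, List.foldl_append]
    rw [pv_inner, ih]

-- on equal-paired states pvStep is Set.add on both components
theorem pv_paired (ts : List String) (s : PySem.Set String) :
    ts.foldl pvStep (s, s) = (ts.foldl PySem.Set.add s, ts.foldl PySem.Set.add s) := by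
  induction ts generalizing s with
  | nil => rfl
  | cons t ts ih =>
    have hstep : pvStep (s, s) t = (PySem.Set.add s t, PySem.Set.add s t) := by
      simp only [pvStep, PySem.Set.add]
      by_cases h : PySem.Set.contains s t = true
      · rw [if_pos h, if_pos h]
      · rw [if_neg h, if_neg h]
    rw [List.foldl_cons, hstep, List.foldl_cons, ih]

-- membership in A's seen-set fold
theorem pv_mem_foldl_add (ts : List String) (s : PySem.Set String) (x : String) :
    x ∈ ts.foldl PySem.Set.add s ↔ x ∈ s ∨ x ∈ ts := by
  induction ts generalizing s with
  | nil => simp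
  | cons t ts ih =>
    rw [List.foldl_cons, ih]
    constructor
    · rintro (h | h)
      · simp only [PySem.Set.add] at h
        split at h
        · exact Or.inl h
        · rcases List.mem_append.mp h with h | h
          · exact Or.inl h
          · simp at h; simp [h]
      · simp [h]
    · rintro (h | h)
      · left
        simp only [PySem.Set.add]
        split
        · exact h
        · exact List.mem_append.mpr (Or.inl h)
      · rcases List.mem_cons.mp h with h | h
        · left
          simp only [PySem.Set.add]
          split
          · rename_i hc
            subst h
            simpa [PySem.Set.contains] using hc
          · subst h; simp
        · exact Or.inr h

-- FN ts = the first-occurrence indices of ts, increasing (Nat side)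
def pvFN (ts : List String) : List Nat :=
  (List.range ts.length).filter (fun i => decide (∀ j, j < i → ts.getD j "" ≠ ts.getD i ""))

-- A's fold lists the tokens at the first-occurrence indices, in index order
theorem pv_A_eq_FN (ts : List String) :
    ts.foldl PySem.Set.add [] = (pvFN ts).map (fun k => ts.getD k "") := by
  induction ts using List.reverseRecOn with
  | nil => rfl
  | append_singleton ts t ih =>
    rw [List.foldl_append, List.foldl_cons, List.foldl_nil]
    have hFN : pvFN (ts ++ [t])
        = pvFN ts ++ (if t ∈ ts then [] else [ts.length]) := by
      unfold pvFN
      rw [List.length_append, List.length_singleton, List.range_succ, List.filter_append]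
      congr 1
      · apply List.filter_congr
        intro i hi
        have hilt : i < ts.length := List.mem_range.mp hi
        simp only [decide_eq_decide]
        constructor
        · intro h j hj
          have := h j hj
          rwa [List.getD_append _ _ _ _ (hj.trans hilt), List.getD_append _ _ _ _ hilt] at this
        · intro h j hj
          rw [List.getD_append _ _ _ _ (hj.trans hilt), List.getD_append _ _ _ _ hilt]
          exact h j hj
      · have hget : (ts ++ [t]).getD ts.length "" = t := by
          rw [List.getD_eq_getElem?_getD, List.getElem?_append_right (le_refl _)]
          simp
        by_cases hmem : t ∈ ts
        · rw [if_pos hmem, List.filter_singleton]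
          have hd : (decide (∀ j, j < ts.length → (ts ++ [t]).getD j "" ≠ (ts ++ [t]).getD ts.length "")) = false := by
            simp only [decide_eq_false_iff_not, not_forall]
            rcases List.mem_iff_getElem.mp hmem with ⟨k, hk, hke⟩
            refine ⟨k, hk, ?_⟩
            rw [List.getD_append _ _ _ _ hk, hget]
            simp [List.getD_eq_getElem?_getD, List.getElem?_eq_getElem hk, hke]
          rw [hd, Bool.cond_false]
        · rw [if_neg hmem, List.filter_singleton]
          have hd : (decide (∀ j, j < ts.length → (ts ++ [t]).getD j "" ≠ (ts ++ [t]).getD ts.length "")) = true := by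
            simp only [decide_eq_true_eq]
            intro j hj
            rw [List.getD_append _ _ _ _ hj, hget]
            intro hc
            apply hmem
            rw [← hc, List.getD_eq_getElem?_getD, List.getElem?_eq_getElem hj]
            exact List.getElem_mem hj
          rw [hd, Bool.cond_true]
    by_cases hmem : t ∈ ts
    · have : PySem.Set.add (ts.foldl PySem.Set.add []) t = ts.foldl PySem.Set.add [] := by
        simp only [PySem.Set.add]
        rw [if_pos]
        simp only [PySem.Set.contains, List.contains_iff_mem]
        exact (pv_mem_foldl_add ts [] t).mpr (Or.inr hmem)
      rw [this, ih, hFN, if_pos hmem, List.append_nil]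
      apply List.map_congr_left
      intro k hk
      have hklt : k < ts.length := List.mem_range.mp (List.mem_of_mem_filter hk)
      rw [List.getD_append _ _ _ _ hklt]
    · have : PySem.Set.add (ts.foldl PySem.Set.add []) t = ts.foldl PySem.Set.add [] ++ [t] := by
        simp only [PySem.Set.add]
        rw [if_neg]
        simp only [PySem.Set.contains, List.contains_iff_mem]
        intro hc
        exact hmem (((pv_mem_foldl_add ts [] t).mp hc).resolve_left (by simp))
      rw [this, ih, hFN, if_neg hmem, List.map_append, List.map_singleton]
      congr 1
      · apply List.map_congr_left
        intro k hk
        have hklt : k < ts.length := List.mem_range.mp (List.mem_of_mem_filter hk)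
        rw [List.getD_append _ _ _ _ hklt]
      · congr 1
        rw [List.getD_eq_getElem?_getD, List.getElem?_append_right (le_refl _)]
        simp

-- B's run-leader scan (structural form of the foldl over (keep, prev))
def pvK : List (String × Int) → Option String → List Int
  | [], _ => []
  | p :: rest, prev =>
      if some p.1 ≠ prev then p.2 :: pvK rest (some p.1) else pvK rest (some p.1)

theorem pv_foldl_k (q : List (String × Int)) (acc : List Int) (prev : Option String) :
    (q.foldl (fun st p => ((if some p.1 ≠ st.2 then st.1 ++ [p.2] else st.1), some p.1))
      (acc, prev)).1 = acc ++ pvK q prev := by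
  induction q generalizing acc prev with
  | nil => simp [pvK]
  | cons p rest ih =>
    rw [List.foldl_cons]
    by_cases h : some p.1 ≠ prev
    · simp only [pvK, if_pos h, ih, List.append_assoc, List.singleton_append]
    · simp only [pvK, if_neg h, ih]

theorem pv_k_sublist (q : List (String × Int)) (prev : Option String) :
    (pvK q prev).Sublist (q.map Prod.snd) := by
  induction q generalizing prev with
  | nil => simp [pvK]
  | cons p rest ih =>
    simp only [pvK, List.map_cons]
    split
    · exact (ih (some p.1)).cons₂ _
    · exact (ih (some p.1)).cons _

-- the Inv: in a lex-sorted pair list with distinct indices, the scan keeps exactly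
-- the minimal index of each name (names equal to prev excluded)
theorem pv_k_mem (q : List (String × Int)) (prev : Option String)
    (hpw : q.Pairwise (fun p r => toLex p ≤ toLex r))
    (hnd : (q.map Prod.snd).Nodup)
    (hprev : ∀ s, prev = some s → ∀ p ∈ q, s ≤ p.1)
    (i : Int) :
    i ∈ pvK q prev ↔ ∃ t, (t, i) ∈ q ∧ some t ≠ prev ∧ ∀ j, (t, j) ∈ q → i ≤ j := by
  induction q generalizing prev with
  | nil => simp [pvK]
  | cons p rest ih =>
    obtain ⟨h1, hpw'⟩ := List.pairwise_cons.mp hpw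
    obtain ⟨hnd1, hnd'⟩ := by
      rw [List.map_cons] at hnd; exact List.nodup_cons.mp hnd
    have hle : ∀ r ∈ rest, p.1 ≤ r.1 := by
      intro r hr
      rcases Prod.Lex.toLex_le_toLex.mp (h1 r hr) with h | h
      · exact le_of_lt h
      · exact le_of_eq h.1
    have hprev' : ∀ s, (some p.1 : Option String) = some s → ∀ r ∈ rest, s ≤ r.1 := by
      rintro s hs r hr
      cases hs
      exact hle r hr
    have ihr := ih (some p.1) hpw' hnd' hprev' 
    constructor
    · intro hmem
      simp only [pvK] at hmem
      have hrest : i ∈ pvK rest (some p.1) →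
          ∃ t, (t, i) ∈ p :: rest ∧ some t ≠ prev ∧ ∀ j, (t, j) ∈ p :: rest → i ≤ j := by
        intro hr
        obtain ⟨t, htm, htne, htmin⟩ := ihr.mp hr
        refine ⟨t, List.mem_cons_of_mem _ htm, ?_, ?_⟩
        · cases prev with
          | none => simp
          | some s =>
            intro hc
            injection hc with hc
            subst hc
            have h1' : t ≤ p.1 := hprev t rfl p (List.mem_cons_self)
            have h2' : p.1 ≤ t := hle (t, i) htm
            exact htne (by rw [le_antisymm h1' h2'])
        · intro j hj
          rcases List.mem_cons.mp hj with hj | hj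
          · exfalso
            apply htne
            rw [show t = p.1 from congrArg Prod.fst hj]
          · exact htmin j hj
      split at hmem
      · rcases List.mem_cons.mp hmem with hi | hi
        · subst hi
          refine ⟨p.1, by simp, by assumption, ?_⟩
          intro j hj
          rcases List.mem_cons.mp hj with hj | hj
          · rw [show j = p.2 from congrArg Prod.snd hj]
          · rcases Prod.Lex.toLex_le_toLex.mp (h1 _ hj) with h | h
            · exact absurd h (lt_irrefl _)
            · exact h.2
        · exact hrest hi
      · exact hrest hmem
    · rintro ⟨t, htm, htne, htmin⟩
      rcases List.mem_cons.mp htm with hh | hh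
      · have ht : t = p.1 := congrArg Prod.fst hh
        have hi : i = p.2 := congrArg Prod.snd hh
        subst ht; subst hi
        simp only [pvK, if_pos htne]
        exact List.mem_cons_self
      · have htne' : t ≠ p.1 := by
          intro hc
          subst hc
          have hip : i ≤ p.2 := htmin p.2 (by simp)
          have hpi : p.2 ≤ i := by
            rcases Prod.Lex.toLex_le_toLex.mp (h1 _ hh) with h | h
            · exact absurd h (lt_irrefl _)
            · exact h.2
          have : i = p.2 := le_antisymm hip hpi
          subst this
          exact hnd1 (List.mem_map.mpr ⟨_, hh, rfl⟩)
        have : i ∈ pvK rest (some p.1) := by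
          apply ihr.mpr
          refine ⟨t, hh, by simpa using htne', ?_⟩
          intro j hj
          exact htmin j (List.mem_cons_of_mem _ hj)
        simp only [pvK]
        split
        · exact List.mem_cons_of_mem _ this
        · exact this

-- sorted2 with fst/snd keys is sorted with the lexicographic key
theorem pv_sorted2_eq (xs : List (String × Int)) :
    PySem.List.sorted2 xs Prod.fst Prod.snd = PySem.List.sorted xs (fun p => toLex p) := by
  show xs.foldl (fun acc x => PySem.List.insertBy _ x acc) []
      = xs.foldl (fun acc x => PySem.List.insertBy _ x acc) []
  congr 1
  funext acc x
  congr 1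
  funext a b
  simp only [Prod.Lex.toLex_lt_toLex]
  rcases lt_trichotomy a.1 b.1 with h | h | h
  · simp [h, asymm h]
  · simp [h]
  · simp [not_lt_of_gt h, ne_of_gt h, h]

-- the index list zipped in B's port, and membership in the zip
theorem pv_mem_zip (ts : List String) (t : String) (i : Int) :
    (t, i) ∈ ts.zip ((List.range ts.length).map (Nat.cast : Nat → Int))
      ↔ ∃ k, ∃ _ : k < ts.length, ts[k] = t ∧ i = (k : Int) := by
  constructor
  · intro h
    rcases List.mem_iff_getElem.mp h with ⟨k, hk, hke⟩
    rw [List.getElem_zip] at hke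
    have hk' : k < ts.length := by
      simpa using lt_of_lt_of_le hk (by simp [List.length_zip])
    refine ⟨k, hk', ?_, ?_⟩
    · exact congrArg Prod.fst hke
    · have := congrArg Prod.snd hke
      simp only at this
      rw [← this]
      simp
  · rintro ⟨k, hk, ht, hi⟩
    apply List.mem_iff_getElem.mpr
    refine ⟨k, by simp [List.length_zip, hk], ?_⟩
    rw [List.getElem_zip]
    subst ht hi
    congr 1
    simp

theorem pv_map_snd_zip_range (ts : List String) :
    (ts.zip ((List.range ts.length).map (Nat.cast : Nat → Int))).map Prod.snd
      = (List.range ts.length).map (Nat.cast : Nat → Int) :=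
  List.map_snd_zip (by simp)

-- B's kept indices are exactly the first-occurrence indices (as sets)
theorem pv_keep_mem (ts : List String) (i : Int) :
    i ∈ pvK (PySem.List.sorted
        (ts.zip ((List.range ts.length).map (Nat.cast : Nat → Int)))
        (fun p => toLex p)) none
      ↔ i ∈ (pvFN ts).map (Nat.cast : Nat → Int) := by
  set P := ts.zip ((List.range ts.length).map (Nat.cast : Nat → Int)) with hP
  set q := PySem.List.sorted P (fun p => toLex p) with hq
  have hperm : q.Perm P := PySem.List.sorted_perm _ _ _
  have hpw : q.Pairwise (fun p r => toLex p ≤ toLex r) := PySem.List.sorted_pairwise P _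
  have hnd : (q.map Prod.snd).Nodup := by
    refine ((hperm.map Prod.snd).nodup_iff).mpr ?_
    rw [hP, pv_map_snd_zip_range]
    exact (List.nodup_range).map (fun a b => by exact_mod_cast id)
  rw [pv_k_mem q none hpw hnd (by simp)]
  constructor
  · rintro ⟨t, htm, -, htmin⟩
    have htm' := hperm.subset htm
    rcases (pv_mem_zip ts t i).mp htm' with ⟨k, hk, hkt, hki⟩
    apply List.mem_map.mpr
    refine ⟨k, ?_, hki.symm⟩
    unfold pvFN
    apply List.mem_filter.mpr
    refine ⟨List.mem_range.mpr hk, ?_⟩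
    simp only [decide_eq_true_eq]
    intro j hj hc
    have hjm : (t, (j : Int)) ∈ q := by
      apply hperm.mem_iff.mpr
      apply (pv_mem_zip ts t (j : Int)).mpr
      refine ⟨j, hj.trans hk, ?_, rfl⟩
      rw [List.getD_eq_getElem?_getD, List.getElem?_eq_getElem (hj.trans hk),
        List.getD_eq_getElem?_getD, List.getElem?_eq_getElem hk] at hc
      simpa [hkt] using hc
    have := htmin _ hjm
    rw [hki] at this
    exact absurd (by exact_mod_cast this) (not_le_of_gt hj)
  · intro hmem
    rcases List.mem_map.mp hmem with ⟨k, hkF, hki⟩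
    unfold pvFN at hkF
    have hkr := List.mem_filter.mp hkF
    have hk : k < ts.length := List.mem_range.mp hkr.1
    have hfirst : ∀ j, j < k → ts.getD j "" ≠ ts.getD k "" := by
      simpa using hkr.2
    refine ⟨ts[k], ?_, by simp, ?_⟩
    · apply hperm.mem_iff.mpr
      apply (pv_mem_zip ts ts[k] i).mpr
      exact ⟨k, hk, rfl, hki.symm⟩
    · intro j hjm
      have := hperm.subset hjm
      rcases (pv_mem_zip ts ts[k] j).mp this with ⟨m, hm, hmt, hmj⟩
      subst hmj
      rw [← hki]
      by_contra hc
      have hmk : m < k := by exact_mod_cast lt_of_not_ge hc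
      apply hfirst m hmk
      rw [List.getD_eq_getElem?_getD, List.getElem?_eq_getElem hm,
        List.getD_eq_getElem?_getD, List.getElem?_eq_getElem hk]
      simpa using hmt

-- assemble B's pipeline: it computes exactly A's first-occurrence list
theorem pv_B_eq_FN (ts : List String) :
    (PySem.List.sorted
        ((PySem.List.sorted2 (ts.zip (PySem.List.pyRange 0 (ts.length : Int))) Prod.fst Prod.snd).foldl
          (fun st p => ((if some p.1 ≠ st.2 then st.1 ++ [p.2] else st.1), some p.1))
          (([] : List Int), (none : Option String))).1
        (fun i => i)).map (fun i => PySem.List.pyGetD ts i "")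
    = (pvFN ts).map (fun k => ts.getD k "") := by
  rw [PySem.List.pyRange_zero_natCast, pv_sorted2_eq, pv_foldl_k, List.nil_append]
  set q := PySem.List.sorted
      (ts.zip ((List.range ts.length).map (Nat.cast : Nat → Int)))
      (fun p => toLex p) with hq
  have hkeep : PySem.List.sorted (pvK q none) (fun i => i)
      = (pvFN ts).map (Nat.cast : Nat → Int) := by
    apply PySem.List.sorted_eq_of_perm_of_pairwise_lt
    · apply (List.perm_ext_iff_of_nodup ?_ ?_).mpr
      · intro a
        exact (pv_keep_mem ts a).symm
      · apply List.Nodup.map (fun a b => by exact_mod_cast id)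
        exact (List.pairwise_lt_range.filter _).imp (fun h => Nat.ne_of_lt h)
      · refine List.Nodup.sublist (pv_k_sublist q none) ?_
        refine ((PySem.List.sorted_perm _ _ _).map Prod.snd).nodup_iff.mpr ?_
        rw [pv_map_snd_zip_range]
        exact (List.nodup_range).map (fun a b => by exact_mod_cast id)
    · apply List.Pairwise.map
      · intro a b (h : a < b)
        exact_mod_cast h
      · exact List.pairwise_lt_range.filter _
  rw [hkeep, List.map_map]
  apply List.map_congr_left
  intro k hk
  simp [PySem.List.pyGetD_natCast]

-- ===== VERDICT (by name: the statement is the Claim_ definition above) =====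
theorem normalize_families_py_spec : Claim_equal_normalize_families_py := by
  intro values _
  unfold Spec_normalize_families_py normalize_families_py normalize_families_py_alt
  match values with
  | none => rfl
  | some vs =>
    by_cases hvs : vs = []
    · simp [hvs]
    · simp only [hvs, if_false]
      rw [pv_outer, show (([] : List String), (PySem.Set.empty : PySem.Set String))
           = (([] : PySem.Set String), ([] : PySem.Set String)) from rfl, pv_paired]
      rw [show ((vs.flatMap (fun raw => ((pvChunks raw).map pvNorm).filter (fun n => n ≠ ""))).foldl PySem.Set.add [],
            (vs.flatMap (fun raw => ((pvChunks raw).map pvNorm).filter (fun n => n ≠ ""))).foldl PySem.Set.add []).1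
          = (vs.flatMap (fun raw => ((pvChunks raw).map pvNorm).filter (fun n => n ≠ ""))).foldl PySem.Set.add [] from rfl]
      rw [pv_A_eq_FN, ← pv_B_eq_FN]
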